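-- pv_equiv track=rewrite | github.com/leandropineda/cci6 | c1/string_edits.py | string_edits
-- ===== SOURCE A (Python) =====
-- def string_edits(_string1: str, _string2: str) -> bool:
--     _string_list1 = list(_string1)
--     _string_list2 = list(_string2)
--     len_diff = len(_string_list1) - len(_string_list2)
--     if len_diff == 1:  # remove char
--         diff = list()
--         for i in range(len(_string_list2)):
--             if _string_list1[i] != _string_list2[i]:
--                 diff.append(_string_list1[i])
--                 _string_list1.pop(i)
--         if len(diff) > 1:
--             return False
--     if len_diff == -1:  # add char
--         diff = list()
--         for i in range(len(_string_list1)):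
--             if _string_list1[i] != _string_list2[i]:
--                 diff.append(_string_list2[i])
--                 _string_list2.pop(i)
--         if len(diff) > 1:
--             return False
--     if len_diff == 0:  # replace char
--         diff = list()
--         for i in range(len(_string_list1)):
--             if _string_list1[i] != _string_list2[i]:
--                 diff.append(_string_list2[i])
--         if len(diff) > 1:
--             return False
--     return True
-- ===== SOURCE B (Python) =====
-- def string_edits(_string1: str, _string2: str) -> bool:
--     n1, n2 = len(_string1), len(_string2)
--     len_diff = n1 - n2
--     if len_diff == 1:  # remove char: offset counter instead of popping a list copy
--         skips = 0
--         for i in range(n2):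
--             if _string1[i + skips] != _string2[i]:
--                 skips += 1
--         return skips <= 1
--     if len_diff == -1:  # add char
--         skips = 0
--         for i in range(n1):
--             if _string1[i] != _string2[i + skips]:
--                 skips += 1
--         return skips <= 1
--     if len_diff == 0:  # replace char
--         return sum(1 for a, b in zip(_string1, _string2) if a != b) <= 1
--     return True
-- ===== Notes on version B (the rewrite author's own statement) =====
-- stated objective: simpler
-- what changed: Replaces the mutate-a-list-copy scan (physical list.pop(i) inside the index loop, plus a diff list kept only for its length) by a single pass over the original strings with an integer skip-offset counter that reproduces A's skip-on-mismatch comparison, counting mismatches directly.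
import Mathlib
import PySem

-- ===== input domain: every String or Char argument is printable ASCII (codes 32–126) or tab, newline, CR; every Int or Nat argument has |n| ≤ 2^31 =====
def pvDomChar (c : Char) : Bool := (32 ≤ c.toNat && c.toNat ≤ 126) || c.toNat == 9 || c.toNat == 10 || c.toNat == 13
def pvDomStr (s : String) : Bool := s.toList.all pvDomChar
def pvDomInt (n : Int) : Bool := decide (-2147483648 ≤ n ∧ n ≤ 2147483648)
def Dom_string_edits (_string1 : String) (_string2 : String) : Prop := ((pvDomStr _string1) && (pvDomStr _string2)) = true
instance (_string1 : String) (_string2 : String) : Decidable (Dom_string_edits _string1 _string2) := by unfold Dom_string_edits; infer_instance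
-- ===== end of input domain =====

-- B replaces A's pop-mutated list copies by a single pass with an integer skip-offset counter (same results, simpler bookkeeping).


-- ===== PORT A =====
-- A's ±1-branch loop: `for i in range(len(fixedL))`, comparing cur[i] with fixedL[i],
-- appending cur[i] to diff and doing cur.pop(i) on mismatch; none = IndexError.
def pvALoop (fixedL : List Char) : Nat → Nat → List Char → List Char → Option (List Char × List Char)
  | 0, _, cur, diff => some (cur, diff)
  | fuel+1, i, cur, diff =>
    match PySem.List.pyGet? cur (i : Int), PySem.List.pyGet? fixedL (i : Int) with
    | some c1, some c2 =>
      if c1 ≠ c2 then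
        match PySem.List.pop? cur (i : Int) with
        | some r => pvALoop fixedL fuel (i+1) r.2 (diff ++ [c1])
        | none => none
      else pvALoop fixedL fuel (i+1) cur diff
    | _, _ => none

-- A's equal-length loop: appends l2[i] to diff on mismatch, no mutation.
def pvALoopEq (l1 l2 : List Char) : Nat → Nat → List Char → Option (List Char)
  | 0, _, diff => some diff
  | fuel+1, i, diff =>
    match PySem.List.pyGet? l1 (i : Int), PySem.List.pyGet? l2 (i : Int) with
    | some c1, some c2 => pvALoopEq l1 l2 fuel (i+1) (if c1 ≠ c2 then diff ++ [c2] else diff)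
    | _, _ => none

def string_editsAux (_string1 : String) (_string2 : String) : Option Bool :=
  let l1 := _string1.toList
  let l2 := _string2.toList
  let len_diff : Int := (l1.length : Int) - (l2.length : Int)
  if len_diff = 1 then       -- remove char
    match pvALoop l2 l2.length 0 l1 [] with
    | none => none
    | some p => if p.2.length > 1 then some false else some true
  else if len_diff = -1 then -- add char
    match pvALoop l1 l1.length 0 l2 [] with
    | none => none
    | some p => if p.2.length > 1 then some false else some true
  else if len_diff = 0 then  -- replace char
    match pvALoopEq l1 l2 l1.length 0 [] with
    | none => none
    | some diff => if diff.length > 1 then some false else some true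
  else some true

def string_edits (_string1 : String) (_string2 : String) : Bool :=
  (string_editsAux _string1 _string2).getD false  -- none = Python IndexError; excluded by Pre_

-- ===== PORT B =====
-- B's ±1-branch loop: reads cur[i + skips] against fixedL[i], bumping skips on mismatch.
def pvBLoop (cur fixedL : List Char) : Nat → Nat → Nat → Option Nat
  | 0, _, skips => some skips
  | fuel+1, i, skips =>
    match PySem.List.pyGet? cur ((i : Int) + (skips : Int)), PySem.List.pyGet? fixedL (i : Int) with
    | some c1, some c2 =>
      if c1 ≠ c2 then pvBLoop cur fixedL fuel (i+1) (skips+1)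
      else pvBLoop cur fixedL fuel (i+1) skips
    | _, _ => none

def string_edits_alt (_string1 : String) (_string2 : String) : Bool :=
  let l1 := _string1.toList
  let l2 := _string2.toList
  let len_diff : Int := (l1.length : Int) - (l2.length : Int)
  if len_diff = 1 then       -- remove char
    match pvBLoop l1 l2 l2.length 0 0 with
    | none => false          -- Python B raises IndexError here, like A; excluded by Pre_
    | some k => decide (k ≤ 1)
  else if len_diff = -1 then -- add char
    match pvBLoop l2 l1 l1.length 0 0 with
    | none => false
    | some k => decide (k ≤ 1)
  else if len_diff = 0 then  -- replace char: sum(1 for a,b in zip if a != b) <= 1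
    decide ((l1.zip l2).foldl (fun acc p => if p.1 ≠ p.2 then acc + 1 else acc) (0 : Int) ≤ 1)
  else true

-- ===== PRECONDITION & SPEC =====
-- first index at which the two lists differ (over their common prefix)
def pvFirstMM : List Char → List Char → Option Nat
  | a :: as, b :: bs => if a ≠ b then some 0 else (pvFirstMM as bs).map (· + 1)
  | _, _ => none

-- With |longer| = |shorter| + 1: A's loop pops a second time before the last step
-- (and then runs off the end of the popped list) unless, after the first mismatch d,
-- the once-shifted tails agree up to the last position.
def pvNoRaise (longer shorter : List Char) : Bool :=
  match pvFirstMM longer shorter with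
  | none => true
  | some d =>
    decide ((longer.drop (d+2)).take (shorter.length - d - 2)
          = (shorter.drop (d+1)).take (shorter.length - d - 2))

-- Pre_ excludes exactly the inputs on which Python A raises IndexError (its pop(i)
-- shrinks the list it is still indexing); Python B raises on exactly the same inputs.
def Pre_string_edits (_string1 : String) (_string2 : String) : Prop :=
  (_string1.toList.length = _string2.toList.length + 1 → pvNoRaise _string1.toList _string2.toList = true) ∧
  (_string2.toList.length = _string1.toList.length + 1 → pvNoRaise _string2.toList _string1.toList = true)

instance (_string1 : String) (_string2 : String) : Decidable (Pre_string_edits _string1 _string2) := by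
  unfold Pre_string_edits; infer_instance

def pvWitness_string_edits : String × String := ("abc", "adc")

def Spec_string_edits (_string1 : String) (_string2 : String) (out : Bool) : Prop := out = string_edits_alt _string1 _string2
instance (_string1 : String) (_string2 : String) (out : Bool) : Decidable (Spec_string_edits _string1 _string2 out) := by unfold Spec_string_edits; infer_instance

-- ===== CLAIM (what is proved, stated in full; the proofs are below) =====
def Claim_equal_string_edits : Prop := ∀ (_string1 : String) (_string2 : String), Dom_string_edits _string1 _string2 → Pre_string_edits _string1 _string2 → Spec_string_edits _string1 _string2 (string_edits _string1 _string2)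

-- ===== LEMMAS AND PROOFS =====

-- Loop correspondence: if cur agrees with orig shifted by k from position i on,
-- A's pop-loop and B's offset-loop fail together, and otherwise the final diff
-- length and the final skip count agree (up to the amounts already accumulated).
lemma pvLoop_rel (orig fixedL : List Char) :
    ∀ (fuel i k : Nat) (cur diff : List Char),
    (∀ j : Nat, i ≤ j → cur[j]? = orig[j + k]?) →
    match pvALoop fixedL fuel i cur diff, pvBLoop orig fixedL fuel i k with
    | some p, some k' => p.2.length + k = diff.length + k'
    | none, none => True
    | _, _ => False := by
  intro fuel
  induction fuel with
  | zero =>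
    intro i k cur diff _
    simp [pvALoop, pvBLoop]
  | succ fuel ih =>
    intro i k cur diff hinv
    have hc : cur[i]? = orig[i + k]? := hinv i le_rfl
    have hcast : (i : Int) + (k : Int) = ((i + k : Nat) : Int) := by push_cast; ring
    rw [pvALoop, pvBLoop, hcast]
    simp only [PySem.List.pyGet?_natCast, hc]
    cases horig : orig[i + k]? with
    | none => simp
    | some c1 =>
      cases hfix : fixedL[i]? with
      | none => simp
      | some c2 =>
        dsimp only
        by_cases hne : c1 = c2
        · rw [if_neg (not_not_intro hne), if_neg (not_not_intro hne)]
          exact ih (i+1) k cur diff (fun j hj => hinv j (by omega))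
        · have hlt : i < cur.length := (List.getElem?_eq_some_iff.mp (hc.trans horig)).1
          rw [if_pos hne, if_pos hne, PySem.List.pop?_natCast cur i hlt]
          dsimp only
          have hinv' : ∀ j : Nat, i + 1 ≤ j → (cur.eraseIdx i)[j]? = orig[j + (k+1)]? := by
            intro j hj
            rw [List.getElem?_eraseIdx]
            have hji : ¬ j < i := by omega
            simp only [hji, if_false]
            rw [hinv (j+1) (by omega)]
            congr 1
            omega
          have hrec := ih (i+1) (k+1) (cur.eraseIdx i) (diff ++ [c1]) hinv'
          revert hrec
          cases pvALoop fixedL fuel (i+1) (cur.eraseIdx i) (diff ++ [c1]) with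
          | none => cases pvBLoop orig fixedL fuel (i+1) (k+1) <;> simp
          | some p =>
            cases pvBLoop orig fixedL fuel (i+1) (k+1) with
            | none => simp
            | some k' =>
              intro h
              simp only [List.length_append, List.length_cons, List.length_nil] at h ⊢
              omega

-- Equal-length loop: A's diff accumulates exactly the mismatched pairs of the zipped tails.
lemma pvEqLoop_rel (l1 l2 : List Char) (hlen : l1.length = l2.length) :
    ∀ (fuel i : Nat) (diff : List Char), i + fuel = l1.length →
    ∃ d, pvALoopEq l1 l2 fuel i diff = some d ∧
      (d.length : Int) = diff.length + (((l1.drop i).zip (l2.drop i)).countP (fun p => p.1 ≠ p.2) : Nat) := by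
  intro fuel
  induction fuel with
  | zero =>
    intro i diff hi
    refine ⟨diff, by simp [pvALoopEq], ?_⟩
    have : l1.drop i = [] := by rw [List.drop_eq_nil_iff]; omega
    simp [this]
  | succ fuel ih =>
    intro i diff hi
    have hi1 : i < l1.length := by omega
    have hi2 : i < l2.length := by omega
    rw [pvALoopEq]
    simp only [PySem.List.pyGet?_natCast, List.getElem?_eq_getElem hi1, List.getElem?_eq_getElem hi2]
    obtain ⟨d, hd, hdl⟩ := ih (i+1) (if l1[i] ≠ l2[i] then diff ++ [l2[i]] else diff) (by omega)
    refine ⟨d, hd, ?_⟩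
    rw [List.drop_eq_getElem_cons hi1, List.drop_eq_getElem_cons hi2, List.zip_cons_cons,
      List.countP_cons]
    by_cases hne : l1[i] = l2[i] <;> simp [hne] at hdl ⊢ <;> omega

-- One ±1 branch, assembled from the loop correspondence.
lemma pvBranch_rel (orig fixedL : List Char) :
    ((match pvALoop fixedL fixedL.length 0 orig [] with
      | none => (none : Option Bool)
      | some p => if p.2.length > 1 then some false else some true).getD false)
    = (match pvBLoop orig fixedL fixedL.length 0 0 with
      | none => false
      | some k => decide (k ≤ 1)) := by
  have h := pvLoop_rel orig fixedL fixedL.length 0 0 orig [] (by simp)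
  revert h
  cases pvALoop fixedL fixedL.length 0 orig [] with
  | none => cases pvBLoop orig fixedL fixedL.length 0 0 <;> simp
  | some p =>
    cases pvBLoop orig fixedL fixedL.length 0 0 with
    | none => simp
    | some k =>
      intro h
      simp only [List.length_nil, Nat.add_zero, Nat.zero_add] at h
      dsimp only [Option.getD_some]
      by_cases hgt : p.2.length > 1
      · rw [if_pos hgt]
        have hk : ¬ k ≤ 1 := by omega
        simp [hk]
      · rw [if_neg hgt]
        have hk : k ≤ 1 := by omega
        simp [hk]

lemma pv_main (s1 s2 : String) : string_edits s1 s2 = string_edits_alt s1 s2 := by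
  unfold string_edits string_editsAux string_edits_alt
  set l1 := s1.toList with hl1
  set l2 := s2.toList with hl2
  simp only []
  by_cases h1 : ((l1.length : Int) - (l2.length : Int)) = 1
  · simp only [h1]
    exact pvBranch_rel l1 l2
  · simp only [if_neg h1]
    by_cases h2 : ((l1.length : Int) - (l2.length : Int)) = -1
    · simp only [h2]
      exact pvBranch_rel l2 l1
    · simp only [if_neg h2]
      by_cases h0 : ((l1.length : Int) - (l2.length : Int)) = 0
      · rw [if_pos h0, if_pos h0]
        have hlen : l1.length = l2.length := by omega
        obtain ⟨d, hd, hdl⟩ := pvEqLoop_rel l1 l2 hlen l1.length 0 [] (by omega)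
        rw [hd]
        dsimp only [Option.getD_some]
        have hfold : List.foldl (fun acc p => if p.1 ≠ p.2 then acc + 1 else acc) (0 : Int) (l1.zip l2)
            = (List.countP (fun p => decide (p.1 ≠ p.2)) (l1.zip l2) : Nat) := by
          simpa using PySem.List.foldl_count_if (fun p => decide (p.1 ≠ p.2)) (l1.zip l2) 0
        simp only [List.drop_zero, List.length_nil, Nat.cast_zero, zero_add] at hdl
        by_cases hgt : d.length > 1
        · rw [if_pos hgt]
          simp only [Option.getD_some]
          have hle : ¬ (((List.countP (fun p => decide (p.1 ≠ p.2)) (l1.zip l2) : Nat) : Int) ≤ 1) := by omega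
          rw [hfold]
          exact (decide_eq_false hle).symm
        · rw [if_neg hgt]
          simp only [Option.getD_some]
          have hle : (((List.countP (fun p => decide (p.1 ≠ p.2)) (l1.zip l2) : Nat) : Int) ≤ 1) := by omega
          rw [hfold]
          exact (decide_eq_true hle).symm
      · simp [h0]

-- ===== VERDICT (by name: the statement is the Claim_ definition above) =====
theorem string_edits_spec : Claim_equal_string_edits := by
  intro s1 s2 _ _
  exact pv_main s1 s2
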